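-- pv_equiv track=rewrite | github.com/pypi-data/pypi-mirror-70 | packages/counter-r5-elasticsearch/counter_r5_elasticsearch-0.11.tar.gz/counter_r5_elasticsearch-0.11/counter_r5/reports.py | capitalize_keys
-- ===== SOURCE A (Python) =====
-- from typing import (
--     List,
--     Optional,
--     Callable,
--     NamedTuple,
--     Dict,
--     IO,
--     Tuple,
--     Any,
--     Iterable,
--     Mapping,
-- )
--
-- def capitalize_keys(dicts: List[Dict[str, Any]]) -> List[Dict[str, Any]]:
--     result_dicts = []
--     for d in dicts:
--         capitalized_dict = {}
--         for key, value in d.items():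
--             capitalized_key = '_'.join(w.capitalize() for w in key.split('_'))
--             capitalized_dict[capitalized_key] = value
--         result_dicts.append(capitalized_dict)
--     return result_dicts
-- ===== SOURCE B (Python) =====
-- def _cap_key(key):
--     chars = []
--     word_start = True
--     for c in key:
--         if c == '_':
--             chars.append('_')
--             word_start = True
--         elif word_start:
--             chars.append(c.upper())
--             word_start = False
--         else:
--             chars.append(c.lower())
--     return ''.join(chars)
--
-- def capitalize_keys(dicts):
--     return [dict(zip(map(_cap_key, d), d.values())) for d in dicts]
-- ===== Notes on version B (the rewrite author's own statement) =====
-- stated objective: simpler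
-- what changed: Per key, the split('_')/capitalize-each-word/join pipeline is replaced by one single-pass character scan with a start-of-word flag, and the explicit inner insert loop that rebuilds each dict is replaced by constructing the new dict in one shot from dict(zip(mapped keys, values)).
import Mathlib
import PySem

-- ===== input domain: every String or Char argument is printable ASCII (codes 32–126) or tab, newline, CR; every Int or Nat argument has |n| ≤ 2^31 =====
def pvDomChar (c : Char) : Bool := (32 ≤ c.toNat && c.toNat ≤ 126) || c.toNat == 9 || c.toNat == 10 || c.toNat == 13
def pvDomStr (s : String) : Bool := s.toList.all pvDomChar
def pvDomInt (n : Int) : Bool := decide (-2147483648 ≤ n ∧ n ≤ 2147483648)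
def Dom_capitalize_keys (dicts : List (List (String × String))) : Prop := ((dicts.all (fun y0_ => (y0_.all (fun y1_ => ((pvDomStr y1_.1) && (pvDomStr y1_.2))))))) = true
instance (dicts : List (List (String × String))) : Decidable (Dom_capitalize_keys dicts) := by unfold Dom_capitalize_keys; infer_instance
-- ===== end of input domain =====

-- B capitalizes each key by one single-pass character scan with a start-of-word flag
-- (instead of split('_')/capitalize/join) and builds each result dict in one shot from
-- dict(zip(mapped keys, values)) instead of an explicit insert loop (objective: simpler).

-- ===== PORT A =====
-- w.capitalize(): first char upper-cased, the rest lower-cased (exact on ASCII)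
def pvCapWord (w : List Char) : List Char :=
  match w with
  | [] => []
  | c :: rest => PySem.Chars.upperChar c :: rest.map PySem.Chars.lowerChar

-- '_'.join(w.capitalize() for w in key.split('_'))
def pvCapKeyA (key : String) : String :=
  String.mk (PySem.Chars.join ['_'] ((PySem.Chars.splitOn key.toList ['_']).map pvCapWord))

def capitalize_keys (dicts : List (List (String × String))) : List (List (String × String)) :=
  dicts.map (fun d =>
    ((PySem.Dict.ofList d).items.foldl
      (fun cd kv => cd.insert (pvCapKeyA kv.1) kv.2)
      (PySem.Dict.empty : PySem.Dict String String)).items)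

-- ===== PORT B =====
-- _cap_key: single left-to-right scan; `word_start` is true initially and right after each '_'
def pvCapScan (wordStart : Bool) (cs : List Char) : List Char :=
  match cs with
  | [] => []
  | c :: rest =>
    if c = '_' then '_' :: pvCapScan true rest
    else (if wordStart then PySem.Chars.upperChar c else PySem.Chars.lowerChar c) :: pvCapScan false rest

def pvCapKeyB (key : String) : String :=
  String.mk (pvCapScan true key.toList)

-- dict(zip(map(_cap_key, d), d.values()))
def capitalize_keys_alt (dicts : List (List (String × String))) : List (List (String × String)) :=
  dicts.map (fun d =>
    (PySem.Dict.ofList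
      (((PySem.Dict.ofList d).keys.map pvCapKeyB).zip (PySem.Dict.ofList d).values)).items)

-- ===== PRECONDITION & SPEC =====
def Spec_capitalize_keys (dicts : List (List (String × String))) (out : List (List (String × String))) : Prop := out = capitalize_keys_alt dicts
instance (dicts : List (List (String × String))) (out : List (List (String × String))) : Decidable (Spec_capitalize_keys dicts out) := by unfold Spec_capitalize_keys; infer_instance

-- ===== CLAIM (what is proved, stated in full; the proofs are below) =====
def Claim_equal_capitalize_keys : Prop := ∀ (dicts : List (List (String × String))), Dom_capitalize_keys dicts → Spec_capitalize_keys dicts (capitalize_keys dicts)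

-- ===== LEMMAS AND PROOFS =====

-- clean recursive specification of key.split('_') (single-char separator)
def pvCleanSplit (cs : List Char) : List (List Char) :=
  match cs with
  | [] => [[]]
  | c :: rest =>
    if c = '_' then [] :: pvCleanSplit rest
    else
      match pvCleanSplit rest with
      | [] => [[c]]   -- unreachable: pvCleanSplit is never []
      | h :: t => (c :: h) :: t

theorem pvCleanSplit_ne_nil (cs : List Char) : pvCleanSplit cs ≠ [] := by
  match cs with
  | [] => simp [pvCleanSplit]
  | c :: rest =>
    simp only [pvCleanSplit]
    split_ifs
    · simp
    · cases h : pvCleanSplit rest <;> simp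

def pvConsFst (x : List Char) (ws : List (List Char)) : List (List Char) :=
  match ws with
  | [] => [x]
  | h :: t => (x ++ h) :: t

theorem pvGo_eq (fuel : Nat) (l cur : List Char) (acc : List (List Char))
    (h : l.length < fuel) :
    PySem.Chars.splitOn.go ['_'] fuel l cur acc
      = acc.reverse ++ pvConsFst cur.reverse (pvCleanSplit l) := by
  induction fuel generalizing l cur acc with
  | zero => omega
  | succ n ih =>
    match l with
    | [] =>
      simp [PySem.Chars.splitOn.go, pvCleanSplit, pvConsFst]
    | c :: rest =>
      rw [PySem.Chars.splitOn.go]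
      by_cases hc : c = '_'
      · subst hc
        have hpre : List.isPrefixOf ['_'] ('_' :: rest) = true := by
          simp [List.isPrefixOf]
        rw [if_pos hpre]
        rw [ih _ _ _ (by simpa using Nat.lt_of_succ_lt_succ h)]
        obtain ⟨h', t', ht⟩ : ∃ h' t', pvCleanSplit rest = h' :: t' := by
          cases hs : pvCleanSplit rest with
          | nil => exact absurd hs (pvCleanSplit_ne_nil rest)
          | cons a b => exact ⟨a, b, rfl⟩
        simp [pvCleanSplit, pvConsFst, ht]
      · have hpre : List.isPrefixOf ['_'] (c :: rest) = false := by
          simp [List.isPrefixOf]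
          intro hcc; exact hc hcc.symm
        rw [if_neg (by simp [hpre])]
        rw [ih _ _ _ (by simpa using Nat.lt_of_succ_lt_succ h)]
        obtain ⟨h', t', ht⟩ : ∃ h' t', pvCleanSplit rest = h' :: t' := by
          cases hs : pvCleanSplit rest with
          | nil => exact absurd hs (pvCleanSplit_ne_nil rest)
          | cons a b => exact ⟨a, b, rfl⟩
        simp [pvCleanSplit, pvConsFst, ht, hc]

theorem pvSplitOn_eq (cs : List Char) :
    PySem.Chars.splitOn cs ['_'] = pvCleanSplit cs := by
  rw [PySem.Chars.splitOn, pvGo_eq _ _ _ _ (Nat.lt_succ_self _)]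
  obtain ⟨h', t', ht⟩ : ∃ h' t', pvCleanSplit cs = h' :: t' := by
    cases hs : pvCleanSplit cs with
    | nil => exact absurd hs (pvCleanSplit_ne_nil cs)
    | cons a b => exact ⟨a, b, rfl⟩
  simp [pvConsFst, ht]

-- jcap ws = '_'.join(cap w for w in ws);  jrest is the '_'-prefixed tail form
def pvJrest (ws : List (List Char)) : List Char :=
  match ws with
  | [] => []
  | w :: t => '_' :: (pvCapWord w ++ pvJrest t)

def pvJcap (ws : List (List Char)) : List Char :=
  match ws with
  | [] => []
  | w :: t => pvCapWord w ++ pvJrest t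

theorem pvJoin_eq (ws : List (List Char)) :
    PySem.Chars.join ['_'] (ws.map pvCapWord) = pvJcap ws := by
  induction ws with
  | nil => simp [PySem.Chars.join, List.intercalate, pvJcap]
  | cons w t ih =>
    match t with
    | [] => simp [PySem.Chars.join, List.intercalate, pvJcap, pvJrest]
    | w' :: t' =>
      simp only [PySem.Chars.join, List.intercalate, List.map_cons,
        List.intersperse, List.flatten_cons] at ih ⊢
      rw [ih]
      simp [pvJcap, pvJrest]

def pvJlow (ws : List (List Char)) : List Char :=
  match ws with
  | [] => []
  | w :: t => w.map PySem.Chars.lowerChar ++ pvJrest t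

theorem pvScan_eq (cs : List Char) :
    pvCapScan true cs = pvJcap (pvCleanSplit cs)
      ∧ pvCapScan false cs = pvJlow (pvCleanSplit cs) := by
  induction cs with
  | nil => simp [pvCapScan, pvCleanSplit, pvJcap, pvJlow, pvJrest, pvCapWord]
  | cons c rest ih =>
    obtain ⟨h', t', ht⟩ : ∃ h' t', pvCleanSplit rest = h' :: t' := by
      cases hs : pvCleanSplit rest with
      | nil => exact absurd hs (pvCleanSplit_ne_nil rest)
      | cons a b => exact ⟨a, b, rfl⟩
    by_cases hc : c = '_'
    · subst hc
      constructor <;>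
        simp [pvCapScan, pvCleanSplit, ht, pvJcap, pvJlow, pvJrest, pvCapWord,
          ih.1]
    · constructor <;>
        simp [pvCapScan, hc, pvCleanSplit, ht, pvJcap, pvJlow, pvCapWord,
          ih.2]

theorem pvCapKey_eq : pvCapKeyA = pvCapKeyB := by
  funext key
  unfold pvCapKeyA pvCapKeyB
  rw [pvSplitOn_eq, pvJoin_eq, (pvScan_eq key.toList).1]

-- B's zip of the mapped keys with the values is the map of the transform over the items
theorem pvZip_eq_map (f : String → String) (l : List (String × String)) :
    ((l.map Prod.fst).map f).zip (l.map Prod.snd)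
      = l.map (fun kv => (f kv.1, kv.2)) := by
  induction l with
  | nil => rfl
  | cons kv t ih => simpa using ih

-- A's per-dict insert loop builds exactly dict(zip(mapped keys, values))
theorem pvPerDict_eq (l : List (String × String)) :
    l.foldl (fun cd kv => cd.insert (pvCapKeyA kv.1) kv.2)
        (PySem.Dict.empty : PySem.Dict String String)
      = PySem.Dict.ofList (((l.map Prod.fst).map pvCapKeyB).zip (l.map Prod.snd)) := by
  rw [pvZip_eq_map]
  show _ = (l.map (fun kv => (pvCapKeyB kv.1, kv.2))).foldl
      (fun d kv => d.insert kv.1 kv.2) PySem.Dict.empty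
  rw [List.foldl_map, pvCapKey_eq]

-- ===== VERDICT (by name: the statement is the Claim_ definition above) =====
theorem capitalize_keys_spec : Claim_equal_capitalize_keys := by
  intro dicts _
  unfold Spec_capitalize_keys capitalize_keys capitalize_keys_alt
  simp only [PySem.Dict.keys, PySem.Dict.values]
  refine List.map_congr_left (fun d _ => ?_)
  rw [pvPerDict_eq]
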